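-- pv_equiv track=rewrite | github.com/LilaCica/Hack2025 | fibonacci/main.py | fibonacci_div_by_3
-- ===== SOURCE A (Python) =====
-- def fibonacci_div_by_3(n_str):
--     try:
--         n = int(n_str)
--         if n < 0:
--             return "N/A"
--     except:
--         return "N/A"
--
--     a, b = 0, 1
--     results = []
--
--     while a <= n:
--         if a % 3 == 0:
--             results.append(str(a))
--         a, b = b, a + b
--
--     return ', '.join(results) if results else "N/A"
-- ===== SOURCE B (Python) =====
-- def fibonacci_div_by_3(n_str):
--     try:
--         n = int(n_str)
--     except ValueError:
--         return "N/A"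
--     if n < 0:
--         return "N/A"
--
--     out = []
--     g, g_next = 0, 3
--     while g <= n:
--         out.append(str(g))
--         g, g_next = g_next, 7 * g_next - g
--
--     return ', '.join(out)
-- ===== Notes on version B (the rewrite author's own statement) =====
-- stated objective: alternative
-- what changed: B generates only the every-4th Fibonacci subsequence divisible by 3 directly via the recurrence g' = 7*g_next - g (seeded 0, 3), instead of iterating all Fibonacci numbers and filtering with % 3; the emptiness fallback disappears since 0 is always emitted.
import Mathlib
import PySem

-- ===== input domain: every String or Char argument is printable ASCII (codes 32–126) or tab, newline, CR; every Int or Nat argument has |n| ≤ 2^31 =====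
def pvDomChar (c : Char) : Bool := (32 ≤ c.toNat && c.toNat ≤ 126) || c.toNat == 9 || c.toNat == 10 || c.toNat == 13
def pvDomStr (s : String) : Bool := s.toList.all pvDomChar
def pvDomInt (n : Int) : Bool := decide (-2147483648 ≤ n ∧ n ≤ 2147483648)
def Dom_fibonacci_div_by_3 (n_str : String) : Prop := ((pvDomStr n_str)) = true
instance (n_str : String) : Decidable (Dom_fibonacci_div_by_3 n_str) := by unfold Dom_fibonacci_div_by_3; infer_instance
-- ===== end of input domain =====

-- B lists the multiples-of-3 Fibonacci numbers directly via g' = 7*g_next - g instead of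
-- filtering all Fibonacci numbers with % 3 (alternative algorithm, same asymptotic cost).

-- ===== PORT A =====

-- invariant of A's while-loop state (holds for every consecutive Fibonacci pair), used for termination
def InvA (a b : Int) : Prop := (1 ≤ a ∧ a < b) ∨ (a = 0 ∧ b = 1) ∨ (a = 1 ∧ b = 1)

theorem invA_step {a b : Int} (h : InvA a b) : InvA b (a + b) := by
  unfold InvA at *; omega

-- while a <= n: if a % 3 == 0: results.append(str(a)); a, b = b, a + b
def loopA (n a b : Int) (h : InvA a b) : List String :=
  if _hle : a ≤ n then
    (if PySem.Int.mod a 3 = 0 then [PySem.Int.toStr a] else []) ++ loopA n b (a + b) (invA_step h)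
  else []
termination_by (2 * (n + 1 - a).toNat + (if a < b then 0 else 1) : Nat)
decreasing_by
  unfold InvA at h
  split_ifs <;> omega

def fibonacci_div_by_3 (n_str : String) : String :=
  match PySem.Int.ofStr? n_str with
  | none => "N/A"
  | some n =>
    if n < 0 then "N/A"
    else
      let results := loopA n 0 1 (Or.inr (Or.inl ⟨rfl, rfl⟩))
      if results = [] then "N/A" else PySem.Str.join ", " results

-- ===== PORT B =====

-- invariant of B's while-loop state, used for termination
def InvB (g gnext : Int) : Prop := 0 ≤ g ∧ g < gnext

theorem invB_step {g gnext : Int} (h : InvB g gnext) : InvB gnext (7 * gnext - g) := by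
  unfold InvB at *; omega

-- while g <= n: out.append(str(g)); g, g_next = g_next, 7 * g_next - g
def loopB (n g gnext : Int) (h : InvB g gnext) : List String :=
  if _hle : g ≤ n then
    PySem.Int.toStr g :: loopB n gnext (7 * gnext - g) (invB_step h)
  else []
termination_by (n + 1 - g).toNat
decreasing_by
  unfold InvB at h; omega

def fibonacci_div_by_3_alt (n_str : String) : String :=
  match PySem.Int.ofStr? n_str with
  | none => "N/A"
  | some n =>
    if n < 0 then "N/A"
    else PySem.Str.join ", " (loopB n 0 3 ⟨le_refl 0, by omega⟩)

-- ===== PRECONDITION & SPEC =====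
def Spec_fibonacci_div_by_3 (n_str : String) (out : String) : Prop := out = fibonacci_div_by_3_alt n_str
instance (n_str : String) (out : String) : Decidable (Spec_fibonacci_div_by_3 n_str out) := by unfold Spec_fibonacci_div_by_3; infer_instance

-- ===== CLAIM (what is proved, stated in full; the proofs are below) =====
def Claim_equal_fibonacci_div_by_3 : Prop := ∀ (n_str : String), Dom_fibonacci_div_by_3 n_str → Spec_fibonacci_div_by_3 n_str (fibonacci_div_by_3 n_str)

-- ===== LEMMAS AND PROOFS =====

-- Fibonacci numbers as integers
def F (m : ℕ) : Int := (Nat.fib m : Int)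

theorem F_add_two (m : ℕ) : F (m + 2) = F m + F (m + 1) := by
  unfold F; rw [Nat.fib_add_two]; push_cast; ring

theorem fib_add_four (m : ℕ) : Nat.fib (m + 4) = 3 * Nat.fib (m + 1) + 2 * Nat.fib m := by
  have a2 : Nat.fib (m + 2) = Nat.fib m + Nat.fib (m + 1) := Nat.fib_add_two
  have a3 : Nat.fib (m + 3) = Nat.fib (m + 1) + Nat.fib (m + 2) := Nat.fib_add_two
  have a4 : Nat.fib (m + 4) = Nat.fib (m + 2) + Nat.fib (m + 3) := Nat.fib_add_two
  omega

theorem F_add_eight (m : ℕ) : F (m + 8) = 7 * F (m + 4) - F m := by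
  unfold F
  have h8 : Nat.fib (m + 8) = 3 * Nat.fib (m + 5) + 2 * Nat.fib (m + 4) := by
    have := fib_add_four (m + 4); omega
  have h5 : Nat.fib (m + 5) = 3 * Nat.fib (m + 2) + 2 * Nat.fib (m + 1) := by
    have := fib_add_four (m + 1); omega
  have h4 := fib_add_four m
  have h2 : Nat.fib (m + 2) = Nat.fib m + Nat.fib (m + 1) := Nat.fib_add_two
  push_cast [h8, h5, h4, h2]; ring

theorem fib_dvd3_iff (m : ℕ) : 3 ∣ Nat.fib m ↔ m % 4 = 0 := by
  induction m using Nat.strong_induction_on with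
  | _ m ih =>
    match m with
    | 0 => decide
    | 1 => decide
    | 2 => decide
    | 3 => decide
    | (j + 4) =>
      have h := ih j (by omega)
      have h4 := fib_add_four j
      omega

theorem mod3_F_iff (m : ℕ) : PySem.Int.mod (F m) 3 = 0 ↔ m % 4 = 0 := by
  rw [PySem.Int.mod_eq_zero_iff_dvd, ← fib_dvd3_iff m]
  unfold F
  exact_mod_cast Int.natCast_dvd_natCast

theorem F_mono {j k : ℕ} (h : j ≤ k) : F j ≤ F k := by
  unfold F; exact_mod_cast Nat.fib_mono h

theorem F_lt_add_four (k : ℕ) : F (4 * k) < F (4 * k + 4) := by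
  unfold F
  have h4 := fib_add_four (4 * k)
  have hpos : 0 < Nat.fib (4 * k + 1) := Nat.fib_pos.mpr (by omega)
  have : Nat.fib (4 * k) < Nat.fib (4 * k + 4) := by omega
  exact_mod_cast this

theorem invA_fib (m : ℕ) : InvA (F m) (F (m + 1)) := by
  unfold InvA F
  match m with
  | 0 => right; left; simp
  | 1 => right; right; simp
  | (j + 2) =>
    left
    have h1 : 0 < Nat.fib (j + 2) := Nat.fib_pos.mpr (by omega)
    have h2 : Nat.fib (j + 2) < Nat.fib (j + 2 + 1) := Nat.fib_lt_fib_succ (by omega)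
    constructor
    · exact_mod_cast h1
    · exact_mod_cast h2

theorem invB_fib (k : ℕ) : InvB (F (4 * k)) (F (4 * k + 4)) := by
  refine ⟨?_, F_lt_add_four k⟩
  unfold F; positivity

-- congruence lemmas (the invariant proofs are irrelevant)
theorem loopA_congr (n a b a' b' : Int) (h : InvA a b) (e1 : a = a') (e2 : b = b')
    (h' : InvA a' b') : loopA n a b h = loopA n a' b' h' := by
  subst e1; subst e2; rfl

theorem loopB_congr (n g gn g' gn' : Int) (h : InvB g gn) (e1 : g = g') (e2 : gn = gn')
    (h' : InvB g' gn') : loopB n g gn h = loopB n g' gn' h' := by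
  subst e1; subst e2; rfl

-- A's loop along the canonical Fibonacci pairs
def LA (m : ℕ) (n : Int) : List String := loopA n (F m) (F (m + 1)) (invA_fib m)

-- B's loop along the canonical multiples-of-3 subsequence
def LB (k : ℕ) (n : Int) : List String := loopB n (F (4 * k)) (F (4 * k + 4)) (invB_fib k)

theorem LA_unfold (m : ℕ) (n : Int) :
    LA m n = if F m ≤ n then
      (if PySem.Int.mod (F m) 3 = 0 then [PySem.Int.toStr (F m)] else []) ++ LA (m + 1) n
    else [] := by
  rw [LA, loopA]
  split_ifs with h1 h2 <;> try rfl
  all_goals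
    rw [LA, loopA_congr n (F (m + 1)) (F m + F (m + 1)) (F (m + 1)) (F (m + 1 + 1))
      (invA_step (invA_fib m)) rfl (F_add_two m).symm (invA_fib (m + 1))]

theorem LB_unfold (k : ℕ) (n : Int) :
    LB k n = if F (4 * k) ≤ n then PySem.Int.toStr (F (4 * k)) :: LB (k + 1) n else [] := by
  rw [LB, loopB]
  split_ifs with h1
  · rw [LB, loopB_congr n (F (4 * k + 4)) (7 * F (4 * k + 4) - F (4 * k))
      (F (4 * (k + 1))) (F (4 * (k + 1) + 4)) (invB_step (invB_fib k))
      (by rw [show 4 * (k + 1) = 4 * k + 4 from by omega]) (by rw [show 4 * (k + 1) + 4 = 4 * k + 8 from by omega, F_add_eight]) (invB_fib (k + 1))]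
  · rfl

-- A skips the three intermediate Fibonacci numbers (not divisible by 3) that B never generates
theorem LA_skip (m : ℕ) (n : Int) (hm : ¬ m % 4 = 0) (hle : F m ≤ n) :
    LA m n = LA (m + 1) n := by
  rw [LA_unfold, if_pos hle, if_neg (by rw [mod3_F_iff]; exact hm)]
  rfl

theorem main_eq (n : Int) : ∀ (fuel k : ℕ), (n + 1 - F (4 * k)).toNat ≤ fuel → LA (4 * k) n = LB k n := by
  intro fuel
  induction fuel with
  | zero =>
    intro k hk
    have hgt : ¬ F (4 * k) ≤ n := by omega
    rw [LA_unfold, if_neg hgt, LB_unfold, if_neg hgt]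
  | succ fuel ih =>
    intro k hk
    by_cases h0 : F (4 * k) ≤ n
    · rw [LA_unfold, if_pos h0, if_pos (by rw [mod3_F_iff]; omega),
        LB_unfold, if_pos h0]
      simp only [List.singleton_append, List.cons.injEq, true_and]
      -- chase through the three skipped Fibonacci numbers
      by_cases h1 : F (4 * k + 1) ≤ n
      · rw [LA_skip _ _ (by omega) h1]
        by_cases h2 : F (4 * k + 2) ≤ n
        · rw [show 4 * k + 1 + 1 = 4 * k + 2 from by omega, LA_skip _ _ (by omega) h2]
          by_cases h3 : F (4 * k + 3) ≤ n
          · rw [show 4 * k + 2 + 1 = 4 * k + 3 from by omega, LA_skip _ _ (by omega) h3,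
              show 4 * k + 3 + 1 = 4 * (k + 1) from by omega]
            apply ih
            have hlt := F_lt_add_four k
            have : F (4 * (k + 1)) = F (4 * k + 4) := by rw [show 4 * (k + 1) = 4 * k + 4 from by omega]
            omega
          · -- F (4k+3) > n : both loops are done
            rw [show 4 * k + 2 + 1 = 4 * k + 3 from by omega,
              LA_unfold, if_neg h3, LB_unfold,
              if_neg (fun hc => h3 (le_trans (F_mono (by omega)) hc))]
        · rw [show 4 * k + 1 + 1 = 4 * k + 2 from by omega,
            LA_unfold, if_neg h2, LB_unfold,
            if_neg (fun hc => h2 (le_trans (F_mono (by omega)) hc))]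
      · rw [LA_unfold, if_neg h1, LB_unfold,
          if_neg (fun hc => h1 (le_trans (F_mono (by omega)) hc))]
    · rw [LA_unfold, if_neg h0, LB_unfold, if_neg h0]

theorem F_zero : F 0 = 0 := by unfold F; simp
theorem F_one : F 1 = 1 := by unfold F; simp
theorem F_four : F 4 = 3 := by unfold F; decide

theorem loops_agree (n : Int) :
    loopA n 0 1 (Or.inr (Or.inl ⟨rfl, rfl⟩)) = loopB n 0 3 ⟨le_refl 0, by omega⟩ := by
  have hA : loopA n 0 1 (Or.inr (Or.inl ⟨rfl, rfl⟩)) = LA 0 n := by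
    rw [LA]
    exact loopA_congr n 0 1 (F 0) (F 1) _ F_zero.symm F_one.symm (invA_fib 0)
  have hB : loopB n 0 3 ⟨le_refl 0, by omega⟩ = LB 0 n := by
    rw [LB]
    exact loopB_congr n 0 3 (F (4 * 0)) (F (4 * 0 + 4)) _ (by norm_num [F_zero]) (by norm_num [F_four]) (invB_fib 0)
  rw [hA, hB]
  exact main_eq n _ 0 (le_refl _)

theorem loopA_ne_nil (n : Int) (hn : 0 ≤ n) :
    loopA n 0 1 (Or.inr (Or.inl ⟨rfl, rfl⟩)) ≠ [] := by
  rw [loopA]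
  simp only [dif_pos hn]
  have : PySem.Int.mod 0 3 = 0 := by decide
  rw [if_pos this]
  simp

-- ===== VERDICT (by name: the statement is the Claim_ definition above) =====
theorem fibonacci_div_by_3_spec : Claim_equal_fibonacci_div_by_3 := by
  intro n_str _
  unfold Spec_fibonacci_div_by_3 fibonacci_div_by_3 fibonacci_div_by_3_alt
  cases h : PySem.Int.ofStr? n_str with
  | none => rfl
  | some n =>
    by_cases hn : n < 0
    · simp [hn]
    · have hn0 : 0 ≤ n := by omega
      simp only [if_neg hn]
      rw [if_neg (loopA_ne_nil n hn0), loops_agree n]
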